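-- pv_equiv track=rewrite | github.com/cpp-linter/cpp-linter | cpp_linter/__init__.py | _consolidate_list_to_ranges
-- ===== SOURCE A (Python) =====
-- from typing import TYPE_CHECKING, List, Dict, Tuple, Any, Union, Optional
--
-- def _consolidate_list_to_ranges(numbers: List[int]) -> List[List[int]]:
--     """A helper function that is only used after parsing the lines from a diff that
--     contain additions.
--
--     :param numbers: A `list` of integers representing the lines' numbers that
--         contain additions.
--     :returns: A consolidated sequence of lists. Each list will have 2 items
--         describing the starting and ending lines of all line ``numbers``.
--     """
--     result: List[List[int]] = []
--     for i, n in enumerate(numbers):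
--         if not i:
--             result.append([n])
--         elif n - 1 != numbers[i - 1]:
--             result[-1].append(numbers[i - 1] + 1)
--             result.append([n])
--         if i == len(numbers) - 1:
--             result[-1].append(n + 1)
--     return result
-- ===== SOURCE B (Python) =====
-- from typing import List
--
--
-- def _consolidate_list_to_ranges(numbers: List[int]) -> List[List[int]]:
--     """Divide and conquer: split the list in half, consolidate each half
--     recursively, then stitch the halves together, merging the two ranges at
--     the seam when the right half continues the left half's last run."""
--     if not numbers:
--         return []
--     if len(numbers) == 1:
--         return [[numbers[0], numbers[0] + 1]]
--     mid = len(numbers) // 2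
--     left = _consolidate_list_to_ranges(numbers[:mid])
--     right = _consolidate_list_to_ranges(numbers[mid:])
--     if right[0][0] == left[-1][1]:
--         return left[:-1] + [[left[-1][0], right[0][1]]] + right[1:]
--     return left + right
-- ===== Notes on version B (the rewrite author's own statement) =====
-- stated objective: alternative
-- what changed: Replaces A's single linear enumerate loop (index lookback, in-place mutation of the open range, last-index special case) by a divide-and-conquer recursion: split the list in half, consolidate each half recursively, and merge the seam ranges when the right half continues the left half's last run.
import Mathlib
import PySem

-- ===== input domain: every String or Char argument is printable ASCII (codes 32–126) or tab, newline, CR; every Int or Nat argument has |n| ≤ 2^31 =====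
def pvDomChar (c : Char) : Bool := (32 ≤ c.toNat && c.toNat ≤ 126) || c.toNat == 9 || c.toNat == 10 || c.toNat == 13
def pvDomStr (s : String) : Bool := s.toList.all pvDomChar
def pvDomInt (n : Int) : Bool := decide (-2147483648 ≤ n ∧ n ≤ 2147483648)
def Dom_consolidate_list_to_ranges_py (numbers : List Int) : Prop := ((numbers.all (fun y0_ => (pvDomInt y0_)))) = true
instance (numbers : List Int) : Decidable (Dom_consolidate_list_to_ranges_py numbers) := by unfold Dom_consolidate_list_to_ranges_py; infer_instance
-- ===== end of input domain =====

-- B replaces A's linear enumerate/index-lookback loop (which mutates the open range at the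
-- last result entry and special-cases the last index) by a divide-and-conquer recursion
-- that consolidates each half and merges the seam ranges (alternative decomposition).

-- ===== PORT A =====
-- Appending to the last element of result: Python would raise on an empty result; A's loop never does
-- (the i == 0 iteration appends first), so the .getD [] default is never taken.
def pvAppendLast (r : List (List Int)) (x : Int) : List (List Int) :=
  r.dropLast ++ [(r.getLast?.getD []) ++ [x]]

def pvStepA (numbers : List Int) (result : List (List Int)) (p : Int × Int) : List (List Int) :=
  let i := p.1
  let n := p.2
  let r1 :=
    if i = 0 then result ++ [[n]]
    else if n - 1 ≠ PySem.List.pyGetD numbers (i - 1) 0 then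
      pvAppendLast result (PySem.List.pyGetD numbers (i - 1) 0 + 1) ++ [[n]]
    else result
  if i = (numbers.length : Int) - 1 then pvAppendLast r1 (n + 1) else r1

def consolidate_list_to_ranges_py (numbers : List Int) : List (List Int) :=
  (PySem.List.enumerate numbers 0).foldl (pvStepA numbers) []

-- ===== PORT B =====
-- Python's right[0][0], left[-1][1], left[-1][0], right[0][1] index nonempty lists (both
-- recursive results are nonempty); the .getD defaults are never taken.
def pvMerge (left right : List (List Int)) : List (List Int) :=
  if (right.getD 0 []).getD 0 0 = (left.getLast?.getD []).getD 1 0 then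
    left.dropLast ++ [[(left.getLast?.getD []).getD 0 0, (right.getD 0 []).getD 1 0]] ++ right.drop 1
  else left ++ right

def consolidate_list_to_ranges_py_alt (numbers : List Int) : List (List Int) :=
  if numbers = [] then []
  else if numbers.length = 1 then [[numbers.getD 0 0, numbers.getD 0 0 + 1]]
  else
    pvMerge (consolidate_list_to_ranges_py_alt (numbers.take (numbers.length / 2)))
      (consolidate_list_to_ranges_py_alt (numbers.drop (numbers.length / 2)))
termination_by numbers.length
decreasing_by
  · have h0 : 0 < numbers.length := List.length_pos_of_ne_nil ‹numbers ≠ []›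
    simp [List.length_take]; omega
  · have h0 : 0 < numbers.length := List.length_pos_of_ne_nil ‹numbers ≠ []›
    have h1 : numbers.length ≠ 1 := ‹¬numbers.length = 1›
    simp [List.length_drop]; omega

-- ===== PRECONDITION & SPEC =====
def Spec_consolidate_list_to_ranges_py (numbers : List Int) (out : List (List Int)) : Prop := out = consolidate_list_to_ranges_py_alt numbers
instance (numbers : List Int) (out : List (List Int)) : Decidable (Spec_consolidate_list_to_ranges_py numbers out) := by unfold Spec_consolidate_list_to_ranges_py; infer_instance

-- ===== CLAIM (what is proved, stated in full; the proofs are below) =====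
def Claim_equal_consolidate_list_to_ranges_py : Prop := ∀ (numbers : List Int), Dom_consolidate_list_to_ranges_py numbers → Spec_consolidate_list_to_ranges_py numbers (consolidate_list_to_ranges_py numbers)

-- ===== LEMMAS AND PROOFS =====

-- canonical form both ports are reduced to: the run containing the head ends
-- (exclusive) at pvEnd, and the remaining runs are pvRest
def pvEnd (p : Int) : List Int → Int
  | [] => p + 1
  | n :: t => if n = p + 1 then pvEnd n t else p + 1

def pvRest (p : Int) : List Int → List (List Int)
  | [] => []
  | n :: t => if n = p + 1 then pvRest n t else [n, pvEnd n t] :: pvRest n t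

def pvSpec : List Int → List (List Int)
  | [] => []
  | m :: t => [m, pvEnd m t] :: pvRest m t

-- proof layer for A: process the rest of the run with accumulator acc, then flush
def pvGo (acc : List (List Int)) (start prev : Int) : List Int → List (List Int)
  | [] => acc ++ [[start, prev + 1]]
  | n :: t =>
    if n = prev + 1 then pvGo acc start n t
    else pvGo (acc ++ [[start, prev + 1]]) n n t

theorem pvGo_eq (t : List Int) : ∀ (acc : List (List Int)) (s p : Int),
    pvGo acc s p t = acc ++ [s, pvEnd p t] :: pvRest p t := by
  induction t with
  | nil => intro acc s p; simp [pvGo, pvEnd, pvRest]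
  | cons n t ih =>
    intro acc s p
    by_cases h : n = p + 1 <;> simp [pvGo, pvEnd, pvRest, h, ih]

theorem pvAppendLast_concat (acc : List (List Int)) (r : List Int) (x : Int) :
    pvAppendLast (acc ++ [r]) x = acc ++ [r ++ [x]] := by
  simp [pvAppendLast]

theorem pvLookup (pre rest : List Int) (prev : Int) :
    PySem.List.pyGetD (pre ++ prev :: rest) ((pre.length : Int) + 1 - 1) 0 = prev := by
  have h : ((pre.length : Int) + 1 - 1) = ((pre.length : Nat) : Int) := by omega
  rw [h, PySem.List.pyGetD_natCast]
  simp [List.getD]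

theorem pvA_fold (numbers : List Int) : ∀ (t : List Int) (n : Int) (pre : List Int)
    (acc : List (List Int)) (start prev : Int),
    numbers = pre ++ prev :: n :: t →
    (PySem.List.enumerate (n :: t) ((pre.length : Int) + 1)).foldl (pvStepA numbers)
      (acc ++ [[start]]) = pvGo acc start prev (n :: t) := by
  intro t
  induction t with
  | nil =>
    intro n pre acc start prev hn
    subst hn
    simp only [PySem.List.enumerate_cons, PySem.List.enumerate_nil, List.foldl_cons,
      List.foldl_nil, pvStepA]
    rw [pvLookup pre [n] prev]
    have hi0 : ¬ ((pre.length : Int) + 1 = 0) := by omega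
    have hlast : ((pre.length : Int) + 1 = (((pre ++ prev :: [n]).length : Nat) : Int) - 1) := by
      simp [List.length_append]; omega
    rw [if_neg hi0, if_pos hlast]
    by_cases h : n = prev + 1
    · rw [if_neg (show ¬ (n - 1 ≠ prev) by omega), pvAppendLast_concat]
      simp [pvGo, h]
    · rw [if_pos (show n - 1 ≠ prev by omega), pvAppendLast_concat, pvAppendLast_concat]
      simp [pvGo, h]
  | cons n' t' ih =>
    intro n pre acc start prev hn
    subst hn
    rw [PySem.List.enumerate_cons, List.foldl_cons]
    have hstep : pvStepA (pre ++ prev :: n :: n' :: t') (acc ++ [[start]])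
        (((pre.length : Int) + 1), n)
        = if n = prev + 1 then acc ++ [[start]] else (acc ++ [[start, prev + 1]]) ++ [[n]] := by
      simp only [pvStepA]
      rw [pvLookup pre (n :: n' :: t') prev]
      have hi0 : ¬ ((pre.length : Int) + 1 = 0) := by omega
      have hlast : ¬ ((pre.length : Int) + 1
          = (((pre ++ prev :: n :: n' :: t').length : Nat) : Int) - 1) := by
        simp; omega
      rw [if_neg hi0, if_neg hlast]
      by_cases h : n = prev + 1
      · rw [if_neg (show ¬ (n - 1 ≠ prev) by omega), if_pos h]
      · rw [if_pos (show n - 1 ≠ prev by omega), if_neg h, pvAppendLast_concat]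
        simp
    rw [hstep]
    by_cases h : n = prev + 1
    · rw [if_pos h]
      have := ih n' (pre ++ [prev]) acc start n (by simp)
      simp only [List.length_append, List.length_cons, List.length_nil] at this
      rw [show ((pre.length : Int) + 1 + 1) = (((pre.length + 1 : Nat) : Int) + 1) by push_cast; ring]
      rw [this]
      simp [pvGo, h]
    · rw [if_neg h]
      have := ih n' (pre ++ [prev]) (acc ++ [[start, prev + 1]]) n n (by simp)
      simp only [List.length_append, List.length_cons, List.length_nil] at this
      rw [show ((pre.length : Int) + 1 + 1) = (((pre.length + 1 : Nat) : Int) + 1) by push_cast; ring]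
      rw [this]
      simp [pvGo, h]

theorem pvA_spec (numbers : List Int) : consolidate_list_to_ranges_py numbers = pvSpec numbers := by
  match numbers with
  | [] => rfl
  | [m] => simp [consolidate_list_to_ranges_py, PySem.List.enumerate_cons,
      PySem.List.enumerate_nil, pvStepA, pvAppendLast, pvSpec, pvEnd, pvRest]
  | m :: n :: t =>
    have hA : consolidate_list_to_ranges_py (m :: n :: t) = pvGo [] m m (n :: t) := by
      unfold consolidate_list_to_ranges_py
      rw [PySem.List.enumerate_cons, List.foldl_cons]
      have hstep : pvStepA (m :: n :: t) [] ((0 : Int), m) = [[m]] := by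
        simp [pvStepA]
        intro h
        exact absurd h (by omega)
      rw [hstep]
      have := pvA_fold (m :: n :: t) t n [] [] m m rfl
      simpa using this
    rw [hA, pvGo_eq]
    simp [pvSpec]

theorem pvMerge_cons (x : List Int) (L1 L2 : List (List Int)) (h : L1 ≠ []) :
    pvMerge (x :: L1) L2 = x :: pvMerge L1 L2 := by
  obtain ⟨y, ys, rfl⟩ := List.exists_cons_of_ne_nil h
  simp only [pvMerge, List.getLast?_cons_cons, List.dropLast_cons₂]
  split <;> simp

-- the seam lemma: pvSpec of an append of two nonempty lists is pvMerge of the two pvSpecs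
theorem pvSpec_append (l1 l2 : List Int) (h1 : l1 ≠ []) (h2 : l2 ≠ []) :
    pvSpec (l1 ++ l2) = pvMerge (pvSpec l1) (pvSpec l2) := by
  obtain ⟨a, t1, rfl⟩ := List.exists_cons_of_ne_nil h1
  obtain ⟨b, t2, rfl⟩ := List.exists_cons_of_ne_nil h2
  clear h1
  induction t1 generalizing a with
  | nil =>
    by_cases hb : b = a + 1 <;>
      simp [pvSpec, pvEnd, pvRest, pvMerge, hb]
  | cons n t1' ih =>
    have IH := ih n
    by_cases hn : n = a + 1
    · simp only [List.cons_append] at IH ⊢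
      simp only [pvSpec, pvEnd, pvRest, if_pos hn] at IH ⊢
      rcases hR' : pvRest n t1' with _ | ⟨r, rs⟩
      · rw [hR'] at IH
        simp only [pvMerge] at IH ⊢
        split at IH <;> split <;> simp_all
      · rw [hR'] at IH
        rw [pvMerge_cons _ _ _ (by simp)] at IH ⊢
        simp only [List.cons.injEq] at IH ⊢
        simp_all
    · simp only [List.cons_append] at IH ⊢
      simp only [pvSpec, pvEnd, pvRest, if_neg hn] at IH ⊢
      rw [pvMerge_cons _ _ _ (by simp)]
      exact congrArg _ IH

theorem pvB_bound (k : Nat) : ∀ (l : List Int), l.length ≤ k →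
    consolidate_list_to_ranges_py_alt l = pvSpec l := by
  induction k with
  | zero =>
    intro l hl
    have : l = [] := List.eq_nil_of_length_eq_zero (by omega)
    subst this
    rw [consolidate_list_to_ranges_py_alt]
    simp [pvSpec]
  | succ k ih =>
    intro l hl
    match l with
    | [] => rw [consolidate_list_to_ranges_py_alt]; simp [pvSpec]
    | [m] => rw [consolidate_list_to_ranges_py_alt]; simp [pvSpec, pvEnd, pvRest]
    | m :: n :: t =>
      simp only [List.length_cons] at hl
      rw [consolidate_list_to_ranges_py_alt]
      rw [if_neg (by simp), if_neg (by simp)]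
      have htake : ((m :: n :: t).take ((m :: n :: t).length / 2)).length ≤ k := by
        simp only [List.length_take, List.length_cons]
        omega
      have hdrop : ((m :: n :: t).drop ((m :: n :: t).length / 2)).length ≤ k := by
        simp only [List.length_drop, List.length_cons]
        omega
      have h1 : (m :: n :: t).take ((m :: n :: t).length / 2) ≠ [] := by
        intro h
        have := congrArg List.length h
        simp only [List.length_take, List.length_nil, List.length_cons] at this
        omega
      have h2 : (m :: n :: t).drop ((m :: n :: t).length / 2) ≠ [] := by
        intro h
        have := congrArg List.length h
        simp only [List.length_drop, List.length_nil, List.length_cons] at this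
        omega
      rw [ih _ htake, ih _ hdrop]
      rw [← pvSpec_append _ _ h1 h2, List.take_append_drop]

theorem pvB_spec (numbers : List Int) : consolidate_list_to_ranges_py_alt numbers = pvSpec numbers :=
  pvB_bound numbers.length numbers le_rfl

-- ===== VERDICT (by name: the statement is the Claim_ definition above) =====
theorem consolidate_list_to_ranges_py_spec : Claim_equal_consolidate_list_to_ranges_py := by
  unfold Claim_equal_consolidate_list_to_ranges_py
  intro numbers _
  unfold Spec_consolidate_list_to_ranges_py
  rw [pvA_spec, pvB_spec]
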